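-- pv_equiv track=rewrite | github.com/nitishgupta/nmn-drop | semqa/modules/spans/multi_span.py | _remove_substring_from_decoded_output
-- ===== SOURCE A (Python) =====
-- def _remove_substring_from_decoded_output(spans):
--     new_spans = []
--     lspans = [s.lower() for s in spans]
--
--     for span in spans:
--         lspan = span.lower()
--
--         # remove duplicates due to casing
--         if lspans.count(lspan) > 1:
--             lspans.remove(lspan)
--             continue
--
--         # remove some kinds of substrings
--         if not any((lspan + ' ' in s or ' ' + lspan in s or lspan + 's' in s or lspan + 'n' in s or (
--                 lspan in s and not s.startswith(lspan) and not s.endswith(lspan))) and lspan != s for s in lspans):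
--             new_spans.append(span)
--
--     return new_spans
-- ===== SOURCE B (Python) =====
-- def _dominated_by(lspan, s):
--     """True if lowercased span `lspan` should be dropped because of distinct lowered span `s`."""
--     if lspan == s:
--         return False
--     for pat in (lspan + ' ', ' ' + lspan, lspan + 's', lspan + 'n'):
--         if pat in s:
--             return True
--     return lspan in s and not s.startswith(lspan) and not s.endswith(lspan)
--
--
-- def _remove_substring_from_decoded_output(spans):
--     # One reverse pass with a seen-set keeps exactly the LAST occurrence of each
--     # lowercased value (what A's count/remove dance computes), tested against the
--     # fixed set of distinct lowered spans; output rebuilt back-to-front.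
--     distinct = set(s.lower() for s in spans)
--     seen = set()
--     kept_rev = []
--     for span in reversed(spans):
--         lspan = span.lower()
--         if lspan in seen:
--             continue
--         seen.add(lspan)
--         if not any(_dominated_by(lspan, s) for s in distinct):
--             kept_rev.append(span)
--     kept_rev.reverse()
--     return kept_rev
-- ===== Notes on version B (the rewrite author's own statement) =====
-- stated objective: alternative
-- what changed: Replaces A's mutating count/remove dedup over a shrinking lowered list with a single reverse pass using a seen-set (keeping the last occurrence of each lowered value) and a fixed set of distinct lowered spans for the containment test, building the output back-to-front.
import Mathlib
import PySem

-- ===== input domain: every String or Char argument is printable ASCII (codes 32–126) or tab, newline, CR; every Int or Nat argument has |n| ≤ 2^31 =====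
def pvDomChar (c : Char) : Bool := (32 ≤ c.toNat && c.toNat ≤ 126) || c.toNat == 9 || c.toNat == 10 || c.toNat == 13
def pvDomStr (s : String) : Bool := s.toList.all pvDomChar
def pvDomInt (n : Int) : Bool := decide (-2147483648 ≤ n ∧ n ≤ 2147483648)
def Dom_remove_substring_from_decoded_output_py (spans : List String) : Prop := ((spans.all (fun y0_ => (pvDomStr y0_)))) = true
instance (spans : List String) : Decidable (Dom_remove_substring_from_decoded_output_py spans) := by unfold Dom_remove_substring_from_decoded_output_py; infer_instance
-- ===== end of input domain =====

-- B replaces A's mutating count/remove dedup with one reverse pass keeping the last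
-- occurrence per lowered value (seen-set) and a fixed distinct set for the containment
-- test, building the output back-to-front (objective: alternative, same result proved equal).

-- ===== PORT A =====
-- the generator's condition: '(lspan+' ' in s or ' '+lspan in s or lspan+'s' in s or
-- lspan+'n' in s or (lspan in s and not startswith and not endswith)) and lspan != s'
def condA (lspan s : String) : Bool :=
  (PySem.Str.isIn (lspan ++ " ") s || PySem.Str.isIn (" " ++ lspan) s ||
   PySem.Str.isIn (lspan ++ "s") s || PySem.Str.isIn (lspan ++ "n") s ||
   (PySem.Str.isIn lspan s && !PySem.Str.startswith s lspan && !PySem.Str.endswith s lspan))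
  && !(lspan == s)

-- A's for-loop over spans, carrying the mutable list 'lspans' and the output 'new_spans'.
-- 'lspans.remove(lspan)' is reached only when count > 1, so the element is present and
-- Python never raises; '(remove? …).getD lspans' is exact there (the default is unreachable).
def loopA (rem lspans acc : List String) : List String :=
  match rem with
  | [] => acc
  | span :: rest =>
    let lspan := PySem.Str.lower span
    if 1 < PySem.List.count lspans lspan then
      loopA rest ((PySem.List.remove? lspans lspan).getD lspans) acc
    else if !(lspans.any (fun s => condA lspan s)) then
      loopA rest lspans (acc ++ [span])
    else
      loopA rest lspans acc

def remove_substring_from_decoded_output_py (spans : List String) : List String :=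
  loopA spans (spans.map PySem.Str.lower) []

-- ===== PORT B =====
-- Source B's helper _dominated_by: early return on equality, a loop over four patterns,
-- then the interior-substring test.
def condB (lspan s : String) : Bool :=
  if lspan == s then false
  else if [lspan ++ " ", " " ++ lspan, lspan ++ "s", lspan ++ "n"].any
            (fun pat => PySem.Str.isIn pat s) then true
  else PySem.Str.isIn lspan s && !PySem.Str.startswith s lspan && !PySem.Str.endswith s lspan

-- Source B's reverse pass: skip lowered values already seen, test survivors against the
-- fixed distinct set, append kept spans (output reversed by the wrapper).
def loopB (rem : List String) (distinct seen : PySem.Set String) (acc : List String) : List String :=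
  match rem with
  | [] => acc
  | span :: rest =>
    let lspan := PySem.Str.lower span
    if PySem.Set.contains seen lspan then
      loopB rest distinct seen acc
    else if !(distinct.any (fun s => condB lspan s)) then
      loopB rest distinct (PySem.Set.add seen lspan) (acc ++ [span])
    else
      loopB rest distinct (PySem.Set.add seen lspan) acc

def remove_substring_from_decoded_output_py_alt (spans : List String) : List String :=
  (loopB spans.reverse (PySem.Set.ofList (spans.map PySem.Str.lower)) PySem.Set.empty []).reverse

-- ===== PRECONDITION & SPEC =====
def Spec_remove_substring_from_decoded_output_py (spans : List String) (out : List String) : Prop := out = remove_substring_from_decoded_output_py_alt spans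
instance (spans : List String) (out : List String) : Decidable (Spec_remove_substring_from_decoded_output_py spans out) := by unfold Spec_remove_substring_from_decoded_output_py; infer_instance

-- ===== CLAIM (what is proved, stated in full; the proofs are below) =====
def Claim_equal_remove_substring_from_decoded_output_py : Prop := ∀ (spans : List String), Dom_remove_substring_from_decoded_output_py spans → Spec_remove_substring_from_decoded_output_py spans (remove_substring_from_decoded_output_py spans)

-- ===== LEMMAS AND PROOFS =====

-- the two condition helpers compute the same boolean
lemma cond_eq (lspan s : String) : condA lspan s = condB lspan s := by
  unfold condA condB
  simp only [List.any_cons, List.any_nil, Bool.or_false]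
  cases h : lspan == s <;>
    cases PySem.Str.isIn (lspan ++ " ") s <;>
    cases PySem.Str.isIn (" " ++ lspan) s <;>
    cases PySem.Str.isIn (lspan ++ "s") s <;>
    cases PySem.Str.isIn (lspan ++ "n") s <;>
    simp [h]

-- any over membership-equivalent lists agrees
lemma any_mem_congr (p : String → Bool) {xs ys : List String}
    (h : ∀ v, v ∈ xs ↔ v ∈ ys) : xs.any p = ys.any p := by
  refine Bool.eq_iff_iff.mpr ?_
  simp only [List.any_eq_true]
  constructor
  · rintro ⟨v, hv, hp⟩; exact ⟨v, (h v).mp hv, hp⟩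
  · rintro ⟨v, hv, hp⟩; exact ⟨v, (h v).mpr hv, hp⟩

-- "keep span iff its lowered value never reappears later and no distinct value dominates it"
def okB (dst : List String) (l : String) : Bool := !(dst.any (fun s => condB l s))

def specA (dst : List String) : List String → List String
  | [] => []
  | span :: rest =>
    if PySem.Str.lower span ∈ rest.map PySem.Str.lower then specA dst rest
    else if okB dst (PySem.Str.lower span) then span :: specA dst rest
    else specA dst rest

def specB (dst : List String) : List String → List String → List String
  | [], _ => []
  | span :: rest, seen =>
    if PySem.Str.lower span ∈ seen then specB dst rest seen
    else if okB dst (PySem.Str.lower span) then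
      span :: specB dst rest (PySem.Str.lower span :: seen)
    else specB dst rest (PySem.Str.lower span :: seen)

lemma loopA_eq (dst : List String) : ∀ (rem lspans acc : List String),
    (∀ v, v ∈ lspans ↔ v ∈ dst) →
    (∀ v ∈ rem.map PySem.Str.lower, List.count v lspans = List.count v (rem.map PySem.Str.lower)) →
    loopA rem lspans acc = acc ++ specA dst rem := by
  intro rem
  induction rem with
  | nil => intro lspans acc _ _; simp [loopA, specA]
  | cons span rest ih =>
    intro lspans acc ha hb
    have hmemhd : PySem.Str.lower span ∈ (span :: rest).map PySem.Str.lower := by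
      simp
    have hcnt : List.count (PySem.Str.lower span) lspans
        = List.count (PySem.Str.lower span) (rest.map PySem.Str.lower) + 1 := by
      have := hb _ hmemhd
      simpa [List.count_cons_self] using this
    simp only [loopA, specA, PySem.List.count_eq]
    by_cases hm : PySem.Str.lower span ∈ rest.map PySem.Str.lower
    · have hpos : 0 < List.count (PySem.Str.lower span) (rest.map PySem.Str.lower) :=
        List.count_pos_iff.mpr hm
      rw [if_pos (by omega), if_pos hm]
      have hmem : PySem.Str.lower span ∈ lspans :=
        List.count_pos_iff.mp (by omega)
      rw [PySem.List.remove?_eq_some_erase _ _ hmem, Option.getD_some]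
      apply ih
      · intro v
        by_cases hv : v = PySem.Str.lower span
        · subst hv
          constructor
          · intro _; exact (ha _).mp hmem
          · intro _
            refine List.count_pos_iff.mp ?_
            rw [List.count_erase_self, hcnt]; omega
        · rw [List.mem_erase_of_ne hv]; exact ha v
      · intro v hv
        by_cases hveq : v = PySem.Str.lower span
        · subst hveq; rw [List.count_erase_self, hcnt]; omega
        · rw [List.count_erase_of_ne hveq,
            hb v (by rw [List.map_cons]; exact List.mem_cons_of_mem _ hv),
            List.map_cons]
          exact List.count_cons_of_ne (fun h => hveq h.symm)
    · have hz : List.count (PySem.Str.lower span) (rest.map PySem.Str.lower) = 0 :=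
        List.count_eq_zero.mpr hm
      rw [if_neg (by omega), if_neg hm]
      have hany : (lspans.any fun s => condA (PySem.Str.lower span) s)
          = dst.any fun s => condB (PySem.Str.lower span) s := by
        have h1 : (fun s => condA (PySem.Str.lower span) s)
            = fun s => condB (PySem.Str.lower span) s :=
          funext fun s => cond_eq _ s
        rw [h1]; exact any_mem_congr _ ha
      have hrest : ∀ v ∈ rest.map PySem.Str.lower,
          List.count v lspans = List.count v (rest.map PySem.Str.lower) := by
        intro v hv
        have hne : v ≠ PySem.Str.lower span := fun h => hm (h ▸ hv)
        rw [hb v (by rw [List.map_cons]; exact List.mem_cons_of_mem _ hv), List.map_cons]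
        exact List.count_cons_of_ne (fun h => hne h.symm)
      rw [hany]
      unfold okB
      by_cases hok : (dst.any fun s => condB (PySem.Str.lower span) s) = true
      · simp only [hok, Bool.not_true, Bool.false_eq_true, if_false]
        rw [ih lspans acc ha hrest]
      · have hok' : (dst.any fun s => condB (PySem.Str.lower span) s) = false :=
          Bool.eq_false_iff.mpr hok
        simp only [hok', Bool.not_false, if_true]
        rw [ih lspans (acc ++ [span]) ha hrest, List.append_assoc, List.singleton_append]

lemma specB_congr (dst : List String) : ∀ (rem seen seen' : List String),
    (∀ v, v ∈ seen ↔ v ∈ seen') → specB dst rem seen = specB dst rem seen' := by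
  intro rem
  induction rem with
  | nil => intro _ _ _; rfl
  | cons span rest ih =>
    intro seen seen' h
    simp only [specB]
    have hcons : ∀ v, v ∈ PySem.Str.lower span :: seen ↔ v ∈ PySem.Str.lower span :: seen' := by
      intro v; simp [List.mem_cons, h v]
    by_cases hm : PySem.Str.lower span ∈ seen
    · rw [if_pos hm, if_pos ((h _).mp hm)]; exact ih _ _ h
    · rw [if_neg hm, if_neg (fun c => hm ((h _).mpr c))]
      by_cases hok : okB dst (PySem.Str.lower span) = true
      · rw [if_pos hok, if_pos hok, ih _ _ hcons]
      · rw [if_neg hok, if_neg hok]; exact ih _ _ hcons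

lemma loopB_eq (dst : PySem.Set String) : ∀ (rem : List String) (seen : PySem.Set String) (acc : List String),
    loopB rem dst seen acc = acc ++ specB dst rem seen := by
  intro rem
  induction rem with
  | nil => intro seen acc; simp [loopB, specB]
  | cons span rest ih =>
    intro seen acc
    simp only [loopB, specB, okB]
    have hadd : ∀ v, v ∈ PySem.Set.add seen (PySem.Str.lower span)
        ↔ v ∈ PySem.Str.lower span :: seen := by
      intro v
      rw [PySem.Set.mem_add, List.mem_cons]
      tauto
    by_cases hm : PySem.Str.lower span ∈ seen
    · have hc : PySem.Set.contains seen (PySem.Str.lower span) = true := by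
        simp [pysem, hm]
      rw [if_pos hc, if_pos hm]
      exact ih seen acc
    · have hc : ¬ PySem.Set.contains seen (PySem.Str.lower span) = true := by
        simp [pysem, hm]
      rw [if_neg hc, if_neg hm]
      by_cases hok : (dst.any fun s => condB (PySem.Str.lower span) s) = true
      · simp only [hok, Bool.not_true, Bool.false_eq_true, if_false]
        rw [ih _ acc, specB_congr dst rest _ _ hadd]
      · have hok' : (dst.any fun s => condB (PySem.Str.lower span) s) = false :=
          Bool.eq_false_iff.mpr hok
        simp only [hok', Bool.not_false, if_true]
        rw [ih _ (acc ++ [span]), specB_congr dst rest _ _ hadd,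
          List.append_assoc, List.singleton_append]

lemma specB_append (dst : List String) : ∀ (xs : List String) (y : String) (seen : List String),
    specB dst (xs ++ [y]) seen =
      specB dst xs seen ++
        (if PySem.Str.lower y ∈ seen ∨ PySem.Str.lower y ∈ xs.map PySem.Str.lower then []
         else if okB dst (PySem.Str.lower y) then [y] else []) := by
  intro xs
  induction xs with
  | nil =>
    intro y seen
    by_cases hm : PySem.Str.lower y ∈ seen <;>
      by_cases hok : okB dst (PySem.Str.lower y) = true <;>
      simp [specB, hm, hok]
  | cons x xs ih =>
    intro y seen
    simp only [List.cons_append, specB]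
    by_cases hx : PySem.Str.lower x ∈ seen
    · rw [if_pos hx, if_pos hx, ih y seen, List.map_cons]
      congr 1
      have hiff : (PySem.Str.lower y ∈ seen ∨ PySem.Str.lower y ∈ xs.map PySem.Str.lower)
          ↔ (PySem.Str.lower y ∈ seen ∨
             PySem.Str.lower y ∈ PySem.Str.lower x :: xs.map PySem.Str.lower) := by
        constructor
        · rintro (h | h)
          · exact Or.inl h
          · exact Or.inr (List.mem_cons_of_mem _ h)
        · rintro (h | h)
          · exact Or.inl h
          · rcases List.mem_cons.mp h with he | h
            · exact Or.inl (he ▸ hx)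
            · exact Or.inr h
      exact if_congr hiff rfl rfl
    · rw [if_neg hx, if_neg hx, ih y (PySem.Str.lower x :: seen), List.map_cons]
      have hiff : (PySem.Str.lower y ∈ PySem.Str.lower x :: seen ∨
            PySem.Str.lower y ∈ xs.map PySem.Str.lower)
          ↔ (PySem.Str.lower y ∈ seen ∨
             PySem.Str.lower y ∈ PySem.Str.lower x :: xs.map PySem.Str.lower) := by
        simp [List.mem_cons]; tauto
      rw [if_congr hiff rfl rfl]
      by_cases hok : okB dst (PySem.Str.lower x) = true
      · rw [if_pos hok, if_pos hok, List.cons_append]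
      · rw [if_neg hok, if_neg hok]

lemma specB_reverse (dst : List String) : ∀ (l : List String),
    (specB dst l.reverse []).reverse = specA dst l := by
  intro l
  induction l with
  | nil => rfl
  | cons span rest ih =>
    rw [List.reverse_cons, specB_append dst rest.reverse span [], List.reverse_append, ih]
    have hmemiff : PySem.Str.lower span ∈ rest.reverse.map PySem.Str.lower
        ↔ PySem.Str.lower span ∈ rest.map PySem.Str.lower := by
      rw [List.map_reverse, List.mem_reverse]
    simp only [specA, List.not_mem_nil, false_or]
    by_cases hm : PySem.Str.lower span ∈ rest.map PySem.Str.lower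
    · rw [if_pos (hmemiff.mpr hm), if_pos hm]; simp
    · rw [if_neg (fun c => hm (hmemiff.mp c)), if_neg hm]
      by_cases hok : okB dst (PySem.Str.lower span) = true
      · rw [if_pos hok, if_pos hok]; simp
      · rw [if_neg hok, if_neg hok]; simp

-- ===== VERDICT (by name: the statement is the Claim_ definition above) =====
theorem remove_substring_from_decoded_output_py_spec : Claim_equal_remove_substring_from_decoded_output_py := by
  intro spans _
  unfold Spec_remove_substring_from_decoded_output_py
  unfold remove_substring_from_decoded_output_py remove_substring_from_decoded_output_py_alt
  rw [loopA_eq (PySem.Set.ofList (spans.map PySem.Str.lower)) spans (spans.map PySem.Str.lower) []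
      (fun v => (PySem.Set.mem_ofList _ v).symm) (fun _ _ => rfl)]
  rw [loopB_eq _ spans.reverse PySem.Set.empty []]
  simp only [List.nil_append]
  exact (specB_reverse _ spans).symm
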